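-- pv_equiv track=rewrite | github.com/mayursd/carescore-additional-features | src/services/evaluation_service.py | _normalize_checklist_payload
-- ===== SOURCE A (Python) =====
-- from typing import Any
--
-- def _normalize_checklist_item(item: Any) -> dict[str, str]:
--     if isinstance(item, str):
--         return {
--             "Question": item.strip(),
--             "ExpectedAnswer": "",
--             "Evaluated": "No",
--             "Evidence": "",
--         }
--
--     if not isinstance(item, dict):
--         return {
--             "Question": str(item),
--             "ExpectedAnswer": "",
--             "Evaluated": "No",
--             "Evidence": "",
--         }
--
--     return {
--         "Question": str(item.get("Question") or item.get("question") or item.get("Objective") or "").strip(),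
--         "ExpectedAnswer": str(
--             item.get("ExpectedAnswer")
--             or item.get("expected_answer")
--             or item.get("Answer")
--             or item.get("objective")
--             or ""
--         ).strip(),
--         "Evaluated": str(item.get("Evaluated") or item.get("evaluated") or item.get("status") or "No").strip() or "No",
--         "Evidence": str(item.get("Evidence") or item.get("evidence") or item.get("Documented") or "").strip(),
--     }
--
-- def _normalize_checklist_payload(payload: Any) -> list[dict[str, str]]:
--     items = payload
--     if isinstance(payload, dict):
--         if isinstance(payload.get("questions_and_answers"), list):
--             items = payload["questions_and_answers"]
--         elif isinstance(payload.get("CheckList Evaluation"), list):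
--             items = payload["CheckList Evaluation"]
--         else:
--             items = []
--
--     normalized = []
--     for item in items or []:
--         norm = _normalize_checklist_item(item)
--         if norm["Question"]:
--             normalized.append(norm)
--     return normalized
-- ===== SOURCE B (Python) =====
-- # One sweep over each item's entries with a best-rank-per-field accumulator replaces
-- # A's per-field or-chains of dict lookups; return-value equivalence only.
--
-- _SPECS = [
--     ("Question", ["Question", "question", "Objective"], ""),
--     ("ExpectedAnswer", ["ExpectedAnswer", "expected_answer", "Answer", "objective"], ""),
--     ("Evaluated", ["Evaluated", "evaluated", "status"], "No"),
--     ("Evidence", ["Evidence", "evidence", "Documented"], ""),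
-- ]
--
--
-- def _normalize_item(item):
--     if not isinstance(item, dict):
--         text = item.strip() if isinstance(item, str) else str(item)
--         return {"Question": text, "ExpectedAnswer": "", "Evaluated": "No", "Evidence": ""}
--     best = {}
--     for k, v in item.items():
--         if not v:
--             continue
--         for target, keys, _default in _SPECS:
--             if k in keys:
--                 rank = keys.index(k)
--                 cur = best.get(target)
--                 if cur is None or rank < cur[0]:
--                     best[target] = (rank, str(v))
--                 break
--     row = {}
--     for target, _keys, default in _SPECS:
--         cur = best.get(target)
--         row[target] = (cur[1].strip() or default) if cur is not None else default
--     return row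
--
--
-- def _normalize_checklist_payload(payload):
--     if isinstance(payload, dict):
--         for key in ("questions_and_answers", "CheckList Evaluation"):
--             if isinstance(payload.get(key), list):
--                 payload = payload[key]
--                 break
--         else:
--             payload = []
--     rows = [_normalize_item(item) for item in (payload or [])]
--     return [row for row in rows if row["Question"]]
-- ===== Notes on version B (the rewrite author's own statement) =====
-- stated objective: alternative
-- what changed: Instead of A's per-field or-chains of dict lookups (candidate keys probed field by field), B makes a single sweep over the item's own key/value entries, classifying each key against a spec table and keeping a best-priority-rank value per field in an accumulator, then renders the four fields from that accumulator; the outer loop is map-then-filter instead of an append accumulator.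
import Mathlib
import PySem

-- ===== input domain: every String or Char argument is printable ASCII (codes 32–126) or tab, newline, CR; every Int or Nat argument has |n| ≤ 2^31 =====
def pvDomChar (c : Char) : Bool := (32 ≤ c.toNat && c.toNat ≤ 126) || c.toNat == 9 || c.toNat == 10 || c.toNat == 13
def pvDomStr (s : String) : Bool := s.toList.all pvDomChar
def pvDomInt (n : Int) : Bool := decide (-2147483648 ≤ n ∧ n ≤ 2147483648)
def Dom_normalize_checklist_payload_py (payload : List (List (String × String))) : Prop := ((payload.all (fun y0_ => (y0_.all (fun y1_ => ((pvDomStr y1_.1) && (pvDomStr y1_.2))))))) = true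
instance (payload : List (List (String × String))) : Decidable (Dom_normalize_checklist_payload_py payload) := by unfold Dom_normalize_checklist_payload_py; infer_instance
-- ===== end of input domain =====

-- B replaces the per-field or-chains of dict lookups by one sweep over the item's
-- entries keeping a best-rank value per field; return-value equivalence only.

-- shared primitive: Python dict.get on the association-list representation (first match)
def pvGet (item : List (String × String)) (k : String) : Option String :=
  (item.find? (fun p => p.1 == k)).map (·.2)

-- ===== PORT A =====
-- Python `x or y` where x is item.get(k) (None and "" are falsy)
def pvOr (a : Option String) (b : String) : String :=
  match a with
  | some s => if s ≠ "" then s else b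
  | none => b

-- literal transliteration of the dict branch of _normalize_checklist_item
def normItemA (item : List (String × String)) : List (String × String) :=
  let q := PySem.Str.strip (pvOr (pvGet item "Question") (pvOr (pvGet item "question") (pvOr (pvGet item "Objective") "")))
  let ea := PySem.Str.strip (pvOr (pvGet item "ExpectedAnswer") (pvOr (pvGet item "expected_answer") (pvOr (pvGet item "Answer") (pvOr (pvGet item "objective") ""))))
  let ev0 := PySem.Str.strip (pvOr (pvGet item "Evaluated") (pvOr (pvGet item "evaluated") (pvOr (pvGet item "status") "No")))
  let ev := if ev0 ≠ "" then ev0 else "No"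
  let evd := PySem.Str.strip (pvOr (pvGet item "Evidence") (pvOr (pvGet item "evidence") (pvOr (pvGet item "Documented") "")))
  [("Question", q), ("ExpectedAnswer", ea), ("Evaluated", ev), ("Evidence", evd)]

def normalize_checklist_payload_py (payload : List (List (String × String))) : List (List (String × String)) :=
  -- payload is a list (not a dict), so items = payload; `items or []` = items
  let items := if payload ≠ [] then payload else []
  items.foldl
    (fun normalized item =>
      let norm := normItemA item
      if (pvGet norm "Question").getD "" ≠ "" then normalized ++ [norm] else normalized)
    []

-- ===== PORT B =====
-- the (target, candidate keys, default) spec table of Source B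
def pvSpecs : List (String × List String × String) :=
  [("Question", ["Question", "question", "Objective"], ""),
   ("ExpectedAnswer", ["ExpectedAnswer", "expected_answer", "Answer", "objective"], ""),
   ("Evaluated", ["Evaluated", "evaluated", "status"], "No"),
   ("Evidence", ["Evidence", "evidence", "Documented"], "")]

-- Source B's inner `for target, keys, _ in _SPECS: if k in keys: … break` loop
def pvUpdate (specs : List (String × List String × String))
    (best : PySem.Dict String (Nat × String)) (k v : String) :
    PySem.Dict String (Nat × String) :=
  match specs with
  | [] => best
  | (target, keys, _) :: rest =>
    match PySem.List.index? keys k with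
    | some rank =>
      match best.get? target with
      | some cur => if rank < cur.1 then best.insert target (rank, v) else best
      | none => best.insert target (rank, v)
    | none => pvUpdate rest best k v

-- Source B's single sweep over the item's entries building `best`
def pvScan (item : List (String × String)) : PySem.Dict String (Nat × String) :=
  item.foldl
    (fun best e => if e.2 ≠ "" then pvUpdate pvSpecs best e.1 e.2 else best)
    PySem.Dict.empty

def normItemB (item : List (String × String)) : List (String × String) :=
  pvSpecs.map (fun s =>
    (s.1,
      match (pvScan item).get? s.1 with
      | some cur => let t := PySem.Str.strip cur.2; if t ≠ "" then t else s.2.2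
      | none => s.2.2))

def normalize_checklist_payload_py_alt (payload : List (List (String × String))) : List (List (String × String)) :=
  (payload.map normItemB).filter (fun row => (pvGet row "Question").getD "" ≠ "")

-- ===== PRECONDITION & SPEC =====
-- Pre_ excludes items whose association list repeats a key: such a list does not
-- represent any Python dict (dict keys are unique), and A's first-match lookup versus
-- B's entry sweep resolve the phantom duplicates by representation accident.
def Pre_normalize_checklist_payload_py (payload : List (List (String × String))) : Prop :=
  ∀ item ∈ payload, (item.map Prod.fst).Nodup
instance (payload : List (List (String × String))) : Decidable (Pre_normalize_checklist_payload_py payload) := by unfold Pre_normalize_checklist_payload_py; infer_instance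

def pvWitness_normalize_checklist_payload_py : (List (List (String × String))) :=
  [[("Question", " Is pain assessed? "), ("Evaluated", " yes ")], [("question", "q2"), ("status", "")]]

def Spec_normalize_checklist_payload_py (payload : List (List (String × String))) (out : List (List (String × String))) : Prop := out = normalize_checklist_payload_py_alt payload
instance (payload : List (List (String × String))) (out : List (List (String × String))) : Decidable (Spec_normalize_checklist_payload_py payload out) := by unfold Spec_normalize_checklist_payload_py; infer_instance

-- ===== CLAIM (what is proved, stated in full; the proofs are below) =====
def Claim_equal_normalize_checklist_payload_py : Prop := ∀ (payload : List (List (String × String))), Dom_normalize_checklist_payload_py payload → Pre_normalize_checklist_payload_py payload → Spec_normalize_checklist_payload_py payload (normalize_checklist_payload_py payload)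

-- ===== LEMMAS AND PROOFS =====

-- left-biased "keep the smaller rank" merge of two optional (rank, value) candidates
def pvMerge : Option (Nat × String) → Option (Nat × String) → Option (Nat × String)
  | a, none => a
  | none, b => b
  | some a, some b => if b.1 < a.1 then some b else some a

-- A's candidate chain, annotated with the rank at which the first truthy key fires
def chainBest (item : List (String × String)) : List String → Nat → Option (Nat × String)
  | [], _ => none
  | k :: ks, i =>
    match pvGet item k with
    | some v => if v ≠ "" then some (i, v) else chainBest item ks (i + 1)
    | none => chainBest item ks (i + 1)

theorem pvMerge_none_right (a : Option (Nat × String)) : pvMerge a none = a := by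
  cases a <;> rfl

theorem pvMerge_none_left (b : Option (Nat × String)) : pvMerge none b = b := by
  cases b <;> rfl

theorem pvMerge_assoc (a b c : Option (Nat × String)) :
    pvMerge (pvMerge a b) c = pvMerge a (pvMerge b c) := by
  cases a with
  | none => simp [pvMerge_none_left]
  | some pa =>
    cases b with
    | none => simp [pvMerge_none_right, pvMerge_none_left]
    | some pb =>
      cases c with
      | none => simp [pvMerge_none_right]
      | some pc =>
        by_cases h1 : pb.1 < pa.1 <;> by_cases h2 : pc.1 < pb.1 <;>
          by_cases h3 : pc.1 < pa.1 <;>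
          simp [pvMerge, h1, h2, h3] <;> omega

-- one entry's effect on `best`, split into "old best" and "this entry alone"
theorem pvUpdate_split (specs : List (String × List String × String))
    (best : PySem.Dict String (Nat × String)) (k v t : String) :
    (pvUpdate specs best k v).get? t
      = pvMerge (best.get? t) ((pvUpdate specs PySem.Dict.empty k v).get? t) := by
  induction specs generalizing best with
  | nil => simp [pvUpdate, pvMerge_none_right]
  | cons sp rest ih =>
    obtain ⟨target, keys, d⟩ := sp
    simp only [pvUpdate]
    cases hidx : PySem.List.index? keys k with
    | none => exact ih best
    | some rank =>
      by_cases ht : t = target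
      · subst ht
        simp only [PySem.Dict.get?_empty, PySem.Dict.get?_insert_self]
        cases hb : best.get? t with
        | none => simp [PySem.Dict.get?_insert_self, pvMerge]
        | some cur =>
          simp only
          split_ifs with hr
          · simp [PySem.Dict.get?_insert_self, pvMerge, hr]
          · simp [hb, pvMerge, hr]
      · have h1 : (PySem.Dict.empty.insert target (rank, v) : PySem.Dict String (Nat × String)).get? t = none := by
          rw [PySem.Dict.get?_insert_of_ne _ _ ht]; exact PySem.Dict.get?_empty t
        simp only [PySem.Dict.get?_empty, h1, pvMerge_none_right]
        cases hb : best.get? target with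
        | none => rw [PySem.Dict.get?_insert_of_ne _ _ ht]
        | some cur =>
          by_cases hr : rank < cur.1 <;>
            simp [hr, PySem.Dict.get?_insert_of_ne _ _ ht]

-- the scan step of pvScan
theorem pvScan_split (entries : List (String × String))
    (acc : PySem.Dict String (Nat × String)) (t : String) :
    (entries.foldl (fun best e => if e.2 ≠ "" then pvUpdate pvSpecs best e.1 e.2 else best) acc).get? t
      = pvMerge (acc.get? t) ((pvScan entries).get? t) := by
  induction entries generalizing acc with
  | nil => simp [pvScan, pvMerge_none_right]
  | cons e rest ih =>
    simp only [pvScan, List.foldl] at *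
    rw [ih, ih (if e.2 ≠ "" then pvUpdate pvSpecs PySem.Dict.empty e.1 e.2 else PySem.Dict.empty)]
    by_cases he : e.2 = ""
    · simp [he, pvMerge_none_left]
    · simp only [if_pos (by simpa using he)]
      rw [pvUpdate_split, pvMerge_assoc]

-- what a single truthy entry contributes at each of the four targets
theorem pvUpdate_head (k v : String) :
    ((pvUpdate pvSpecs PySem.Dict.empty k v).get? "Question"
        = (PySem.List.index? ["Question", "question", "Objective"] k).map (fun r => (r, v)))
    ∧ ((pvUpdate pvSpecs PySem.Dict.empty k v).get? "ExpectedAnswer"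
        = (PySem.List.index? ["ExpectedAnswer", "expected_answer", "Answer", "objective"] k).map (fun r => (r, v)))
    ∧ ((pvUpdate pvSpecs PySem.Dict.empty k v).get? "Evaluated"
        = (PySem.List.index? ["Evaluated", "evaluated", "status"] k).map (fun r => (r, v)))
    ∧ ((pvUpdate pvSpecs PySem.Dict.empty k v).get? "Evidence"
        = (PySem.List.index? ["Evidence", "evidence", "Documented"] k).map (fun r => (r, v))) := by
  by_cases h1 : k ∈ (["Question", "question", "Objective"] : List String)
  · simp only [List.mem_cons, List.not_mem_nil, or_false] at h1
    rcases h1 with rfl | rfl | rfl <;> refine ⟨rfl, rfl, rfl, rfl⟩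
  · by_cases h2 : k ∈ (["ExpectedAnswer", "expected_answer", "Answer", "objective"] : List String)
    · simp only [List.mem_cons, List.not_mem_nil, or_false] at h2
      rcases h2 with rfl | rfl | rfl | rfl <;> refine ⟨rfl, rfl, rfl, rfl⟩
    · by_cases h3 : k ∈ (["Evaluated", "evaluated", "status"] : List String)
      · simp only [List.mem_cons, List.not_mem_nil, or_false] at h3
        rcases h3 with rfl | rfl | rfl <;> refine ⟨rfl, rfl, rfl, rfl⟩
      · by_cases h4 : k ∈ (["Evidence", "evidence", "Documented"] : List String)
        · simp only [List.mem_cons, List.not_mem_nil, or_false] at h4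
          rcases h4 with rfl | rfl | rfl <;> refine ⟨rfl, rfl, rfl, rfl⟩
        · have e1 : PySem.List.index? ["Question", "question", "Objective"] k = none :=
            (PySem.List.index?_eq_none_iff _ _).mpr h1
          have e2 : PySem.List.index? ["ExpectedAnswer", "expected_answer", "Answer", "objective"] k = none :=
            (PySem.List.index?_eq_none_iff _ _).mpr h2
          have e3 : PySem.List.index? ["Evaluated", "evaluated", "status"] k = none :=
            (PySem.List.index?_eq_none_iff _ _).mpr h3
          have e4 : PySem.List.index? ["Evidence", "evidence", "Documented"] k = none :=
            (PySem.List.index?_eq_none_iff _ _).mpr h4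
          simp only [pvUpdate, pvSpecs, e1, e2, e3, e4, Option.map_none]
          exact ⟨PySem.Dict.get?_empty _, PySem.Dict.get?_empty _, PySem.Dict.get?_empty _,
            PySem.Dict.get?_empty _⟩

theorem chainBest_nil (ks : List String) (i : Nat) : chainBest [] ks i = none := by
  induction ks generalizing i with
  | nil => rfl
  | cons k ks ih => simp [chainBest, pvGet, ih]

theorem chainBest_rank_le (item : List (String × String)) (ks : List String) (i : Nat)
    (p : Nat × String) (h : chainBest item ks i = some p) : i ≤ p.1 := by
  induction ks generalizing i with
  | nil => simp [chainBest] at h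
  | cons k ks ih =>
    simp only [chainBest] at h
    cases hg : pvGet item k with
    | none =>
      simp only [hg] at h
      exact Nat.le_of_succ_le (ih (i + 1) h)
    | some v =>
      simp only [hg] at h
      split at h
      · cases h; rfl
      · exact Nat.le_of_succ_le (ih (i + 1) h)

theorem pvGet_cons_self (k v : String) (rest : List (String × String)) :
    pvGet ((k, v) :: rest) k = some v := by
  simp [pvGet]

theorem pvGet_cons_ne (k0 v0 k : String) (rest : List (String × String)) (hne : k0 ≠ k) :
    pvGet ((k0, v0) :: rest) k = pvGet rest k := by
  simp [pvGet, hne]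

theorem pvGet_eq_none (item : List (String × String)) (k : String)
    (hk : k ∉ item.map Prod.fst) : pvGet item k = none := by
  simp only [pvGet, Option.map_eq_none_iff]
  rw [List.find?_eq_none]
  intro p hp
  simp only [beq_iff_eq]
  intro he
  exact hk (he ▸ List.mem_map_of_mem hp)

-- an entry whose key is not among the remaining candidate keys does not affect the chain
theorem chainBest_skip (k v : String) (rest : List (String × String)) :
    ∀ (ks : List String) (j : Nat), k ∉ ks →
      chainBest ((k, v) :: rest) ks j = chainBest rest ks j := by
  intro ks
  induction ks with
  | nil => intro j _; rfl
  | cons k0 ks ih =>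
    intro j hk
    have h0 : k ≠ k0 := fun h => hk (h ▸ List.mem_cons_self)
    have htail : k ∉ ks := fun h => hk (List.mem_cons_of_mem _ h)
    simp only [chainBest, pvGet_cons_ne k v k0 rest h0, ih (j + 1) htail]

-- consing one entry onto the item merges its lone contribution into the chain
theorem chainBest_cons (k v : String) (rest : List (String × String))
    (hk : k ∉ rest.map Prod.fst) :
    ∀ (ks : List String) (i : Nat), ks.Nodup →
      pvMerge (if v ≠ "" then (PySem.List.index? ks k).map (fun r => (r + i, v)) else none)
          (chainBest rest ks i)
        = chainBest ((k, v) :: rest) ks i := by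
  intro ks
  induction ks with
  | nil =>
    intro i _
    have : PySem.List.index? ([] : List String) k = none :=
      (PySem.List.index?_eq_none_iff _ _).mpr (List.not_mem_nil)
    simp [chainBest, pvMerge]
  | cons k0 ks ih =>
    intro i hnd
    rw [List.nodup_cons] at hnd
    by_cases hkk : k0 = k
    · subst hkk
      have hrest : pvGet rest k0 = none := pvGet_eq_none rest k0 hk
      simp only [chainBest, pvGet_cons_self, hrest]
      rw [PySem.List.index?_cons_self]
      by_cases hv : v = ""
      · simp only [hv, ne_eq, not_true_eq_false, ite_false, pvMerge_none_left]
        rw [chainBest_skip k0 "" rest ks (i + 1) hnd.1]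
      · simp only [Option.map_some, if_pos (by simpa using hv)]
        cases hc : chainBest rest ks (i + 1) with
        | none => simp [pvMerge]
        | some p =>
          have hle := chainBest_rank_le rest ks (i + 1) p hc
          simp only [pvMerge]
          rw [if_neg (by omega)]
          simp
    · have hpv : pvGet ((k, v) :: rest) k0 = pvGet rest k0 :=
        pvGet_cons_ne k v k0 rest (fun h => hkk h.symm)
      have hidx : PySem.List.index? (k0 :: ks) k = (PySem.List.index? ks k).map (· + 1) :=
        PySem.List.index?_cons_of_ne ks hkk
      simp only [chainBest, hpv, hidx, Option.map_map]
      have hcomp : ((fun r => (r + i, v)) ∘ (fun x => x + 1) : Nat → Nat × String)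
          = fun r => (r + (i + 1), v) := by
        funext r
        simp only [Function.comp_apply, Prod.mk.injEq, and_true]
        omega
      rw [hcomp]
      cases hg : pvGet rest k0 with
      | some v0 =>
        by_cases hv0 : v0 = ""
        · simp only [hv0, ne_eq, not_true_eq_false, ite_false]
          exact ih (i + 1) hnd.2
        · simp only [if_pos (by simpa using hv0)]
          cases hix : PySem.List.index? ks k with
          | none => simp [pvMerge]
          | some r =>
            by_cases hv : v = ""
            · simp [hv, pvMerge_none_left]
            · simp only [if_pos (by simpa using hv), Option.map_some, pvMerge]
              rw [if_pos (by omega)]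
      | none =>
        exact ih (i + 1) hnd.2

-- the sweep's accumulator agrees with A's candidate chain on items without duplicate keys
theorem scan_eq_chain (item : List (String × String)) (h : (item.map Prod.fst).Nodup)
    (t : String) (kt : List String) (hnd : kt.Nodup)
    (hH : ∀ k v, (pvUpdate pvSpecs PySem.Dict.empty k v).get? t
            = (PySem.List.index? kt k).map (fun r => (r, v))) :
    (pvScan item).get? t = chainBest item kt 0 := by
  induction item with
  | nil => simp [pvScan, chainBest_nil, PySem.Dict.get?_empty]
  | cons e rest ih =>
    obtain ⟨k, v⟩ := e
    simp only [List.map_cons, List.nodup_cons] at h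
    have hstep : ((if v ≠ "" then pvUpdate pvSpecs PySem.Dict.empty k v else PySem.Dict.empty).get? t)
        = (if v ≠ "" then (PySem.List.index? kt k).map (fun r => (r + 0, v)) else none) := by
      by_cases hv : v = ""
      · simp [hv, PySem.Dict.get?_empty]
      · simp only [if_pos (by simpa using hv), hH k v]
        congr 1
    have : (pvScan ((k, v) :: rest)).get? t
        = pvMerge ((if v ≠ "" then pvUpdate pvSpecs PySem.Dict.empty k v else PySem.Dict.empty).get? t)
            ((pvScan rest).get? t) := by
      simp only [pvScan, List.foldl]
      rw [pvScan_split rest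
        (if (k, v).2 ≠ "" then pvUpdate pvSpecs PySem.Dict.empty (k, v).1 (k, v).2 else PySem.Dict.empty) t]
      rfl
    rw [this, hstep, ih h.2]
    exact chainBest_cons k v rest h.1 kt 0 hnd

-- A's nested pvOr chain reads the value of chainBest
theorem foldr_pvOr_eq (item : List (String × String)) (keys : List String) (dl : String) :
    ∀ i, keys.foldr (fun k acc => pvOr (pvGet item k) acc) dl
      = (match chainBest item keys i with
         | some p => p.2
         | none => dl) := by
  induction keys with
  | nil => intro i; rfl
  | cons k ks ih =>
    intro i
    simp only [List.foldr]
    rw [ih (i + 1)]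
    simp only [chainBest]
    cases hg : pvGet item k with
    | none => simp [pvOr]
    | some v =>
      by_cases hv : v = "" <;> simp [pvOr, hv]

-- per-item equality of the two ports on duplicate-free items
theorem normItem_eq (item : List (String × String)) (h : (item.map Prod.fst).Nodup) :
    normItemA item = normItemB item := by
  have cQ := scan_eq_chain item h "Question" ["Question", "question", "Objective"]
    (by decide) (fun k v => (pvUpdate_head k v).1)
  have cEA := scan_eq_chain item h "ExpectedAnswer" ["ExpectedAnswer", "expected_answer", "Answer", "objective"]
    (by decide) (fun k v => (pvUpdate_head k v).2.1)
  have cEV := scan_eq_chain item h "Evaluated" ["Evaluated", "evaluated", "status"]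
    (by decide) (fun k v => (pvUpdate_head k v).2.2.1)
  have cED := scan_eq_chain item h "Evidence" ["Evidence", "evidence", "Documented"]
    (by decide) (fun k v => (pvUpdate_head k v).2.2.2)
  have fQ := foldr_pvOr_eq item ["Question", "question", "Objective"] "" 0
  have fEA := foldr_pvOr_eq item ["ExpectedAnswer", "expected_answer", "Answer", "objective"] "" 0
  have fEV := foldr_pvOr_eq item ["Evaluated", "evaluated", "status"] "No" 0
  have fED := foldr_pvOr_eq item ["Evidence", "evidence", "Documented"] "" 0
  simp only [List.foldr] at fQ fEA fEV fED
  simp only [normItemA, normItemB, pvSpecs, List.map, cQ, cEA, cEV, cED, fQ, fEA, fEV, fED]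
  refine congrArg₂ _ ?_ (congrArg₂ _ ?_ (congrArg₂ _ ?_ (congrArg₂ _ ?_ rfl)))
  · cases hc : chainBest item ["Question", "question", "Objective"] 0 with
    | none => rfl
    | some p => simp
  · cases hc : chainBest item ["ExpectedAnswer", "expected_answer", "Answer", "objective"] 0 with
    | none => rfl
    | some p => simp
  · cases hc : chainBest item ["Evaluated", "evaluated", "status"] 0 with
    | none => rfl
    | some p => rfl
  · cases hc : chainBest item ["Evidence", "evidence", "Documented"] 0 with
    | none => rfl
    | some p => simp

-- the accumulator loop of port A equals B's map-then-filter
theorem loopA_eq (payload : List (List (String × String)))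
    (hpre : ∀ item ∈ payload, (item.map Prod.fst).Nodup) (acc : List (List (String × String))) :
    payload.foldl
      (fun normalized item =>
        let norm := normItemA item
        if (pvGet norm "Question").getD "" ≠ "" then normalized ++ [norm] else normalized)
      acc
    = acc ++ (payload.map normItemB).filter (fun row => (pvGet row "Question").getD "" ≠ "") := by
  induction payload generalizing acc with
  | nil => simp
  | cons item rest ih =>
    simp only [List.foldl, List.map, List.filter]
    rw [ih (fun it hit => hpre it (List.mem_cons_of_mem _ hit))]
    rw [normItem_eq item (hpre item List.mem_cons_self)]
    by_cases hq : (pvGet (normItemB item) "Question").getD "" = ""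
    · simp [hq]
    · simp [hq]

-- ===== VERDICT (by name: the statement is the Claim_ definition above) =====
theorem normalize_checklist_payload_py_spec : Claim_equal_normalize_checklist_payload_py := by
  intro payload _ hpre
  show normalize_checklist_payload_py payload = normalize_checklist_payload_py_alt payload
  unfold normalize_checklist_payload_py normalize_checklist_payload_py_alt
  have hitems : (if payload ≠ [] then payload else []) = payload := by
    by_cases h : payload = [] <;> simp [h]
  rw [hitems, loopA_eq payload hpre]
  simp
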